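-- pv_equiv track=rewrite | github.com/Pepper-109/Advent_of_code | 2019/day4/day4.py | findPairs
-- ===== SOURCE A (Python) =====
-- def findPairs(lst, part):
--     if part == 1:
--         toBeRemoved = []
--         for i in lst:
--             pairs = 0
--             for j in range(len(i) - 1):
--                 if i[j] == i[j+1]:
--                     pairs += 1
--             if pairs == 0:
--                 toBeRemoved.append(i)
--
--         for i in toBeRemoved:
--             lst.remove(i)
--     else:
--         toBeRemoved = []
--         for i in lst:
--             pairs = {'0': 0, '1': 0, '2': 0, '3': 0, '4': 0, '5': 0, '6': 0, '7': 0, '8': 0, '9': 0,}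
--             for j in range(len(i) - 1):
--                 if i[j] == i[j+1]:
--                     pairs[str(i[j])] += 1
--             values = 0
--             for key,value in pairs.items():
--                 if value == 1:
--                     values = 1
--
--             if values == 0:
--                 toBeRemoved.append(i)
--
--         for i in toBeRemoved:
--             lst.remove(i)
--
--     return lst
-- ===== SOURCE B (Python) =====
-- # Re-implementation via run-length encoding; mutates lst in place like the original (keeps duplicates/order).
-- def _runs(s):
--     # run-length encoding of s as a list of (char, run_length)
--     runs = []
--     for ch in s:
--         if runs and runs[-1][0] == ch:
--             runs[-1] = (ch, runs[-1][1] + 1)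
--         else:
--             runs.append((ch, 1))
--     return runs
--
--
-- def findPairs(lst, part):
--     if part == 1:
--         def keep(s):
--             return any(n >= 2 for _, n in _runs(s))
--     else:
--         def keep(s):
--             return any(sum(n - 1 for c2, n in _runs(s) if c2 == c) == 1
--                        for c in '0123456789')
--     lst[:] = [s for s in lst if keep(s)]
--     return lst
-- ===== Notes on version B (the rewrite author's own statement) =====
-- stated objective: faster
-- what changed: B computes a run-length encoding of each string once and decides keep/remove from the runs (any run >= 2 for part 1; per-digit sum of run_length-1 equal to 1 for part 2), then rebuilds the list with one in-place filter (O(n)), instead of A's index-pair scan per string plus a per-digit dict and a quadratic lst.remove loop.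
import Mathlib
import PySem

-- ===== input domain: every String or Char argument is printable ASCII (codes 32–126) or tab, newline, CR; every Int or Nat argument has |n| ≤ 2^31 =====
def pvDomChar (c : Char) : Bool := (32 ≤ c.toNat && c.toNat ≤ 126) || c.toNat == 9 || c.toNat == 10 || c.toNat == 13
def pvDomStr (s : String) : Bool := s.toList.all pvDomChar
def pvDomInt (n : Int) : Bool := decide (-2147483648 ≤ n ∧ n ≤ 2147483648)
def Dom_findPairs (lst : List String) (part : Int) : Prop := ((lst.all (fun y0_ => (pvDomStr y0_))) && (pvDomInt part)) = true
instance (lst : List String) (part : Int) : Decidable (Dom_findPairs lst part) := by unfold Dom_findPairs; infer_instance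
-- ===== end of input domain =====

-- B decides keep/remove from a run-length encoding per string and rebuilds the list with one
-- in-place filter, replacing A's quadratic lst.remove loop (timing: measurably faster).
-- Equivalence is about the return value (both A and B mutate lst in place in Python).

-- ===== PORT A =====
-- Python's i[j] is a 1-char string, so i[j] == i[j+1] is char equality, and str(i[j]) is i[j] itself.
-- Every j from range(len(i)-1) is in range, so List.getD never uses its default (exact).
def pvPairCountA (cs : List Char) : Int :=
  (List.range (cs.length - 1)).foldl
    (fun p j => if cs.getD j ' ' = cs.getD (j+1) ' ' then p + 1 else p) 0

-- the dict literal {'0': 0, …, '9': 0}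
def pvDict0 : PySem.Dict Char Int :=
  PySem.Dict.ofList [('0',0),('1',0),('2',0),('3',0),('4',0),('5',0),('6',0),('7',0),('8',0),('9',0)]

-- pairs[str(i[j])] += 1 (KeyError on a repeated non-digit char is excluded by Pre_)
def pvPairDictA (cs : List Char) : PySem.Dict Char Int :=
  (List.range (cs.length - 1)).foldl
    (fun d j => if cs.getD j ' ' = cs.getD (j+1) ' ' then d.modify (cs.getD j ' ') 0 (· + 1) else d)
    pvDict0

-- the values flag: for key,value in pairs.items(): if value == 1: values = 1
def pvValuesA (d : PySem.Dict Char Int) : Int :=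
  d.items.foldl (fun v kv => if kv.2 = 1 then 1 else v) 0

-- for i in toBeRemoved: lst.remove(i)  (remove always succeeds here; getD totalises)
def pvRemoveAll (lst toBeRemoved : List String) : List String :=
  toBeRemoved.foldl (fun cur i => (PySem.List.remove? cur i).getD cur) lst

def findPairs (lst : List String) (part : Int) : List String :=
  if part = 1 then
    let toBeRemoved := lst.foldl (fun acc i => if pvPairCountA i.toList = 0 then acc ++ [i] else acc) []
    pvRemoveAll lst toBeRemoved
  else
    let toBeRemoved := lst.foldl (fun acc i => if pvValuesA (pvPairDictA i.toList) = 0 then acc ++ [i] else acc) []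
    pvRemoveAll lst toBeRemoved

-- ===== PORT B =====
-- run-length encoding of s as a list of (char, run_length): extend the last run or append a new one
def pvRuns (cs : List Char) : List (Char × Int) :=
  cs.foldl (fun runs ch =>
    match runs.getLast? with
    | some (c, n) => if c = ch then runs.dropLast ++ [(c, n + 1)] else runs ++ [(ch, 1)]
    | none => [(ch, 1)]) []

def pvKeep1 (s : String) : Bool := (pvRuns s.toList).any (fun r => 2 ≤ r.2)

def pvDigits : List Char := ['0','1','2','3','4','5','6','7','8','9']

-- sum(n - 1 for c2, n in runs if c2 == c)
def pvSumFor (c : Char) (runs : List (Char × Int)) : Int :=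
  runs.foldl (fun acc r => if r.1 = c then acc + (r.2 - 1) else acc) 0

def pvKeep2 (s : String) : Bool := pvDigits.any (fun c => pvSumFor c (pvRuns s.toList) == 1)

def findPairs_alt (lst : List String) (part : Int) : List String :=
  if part = 1 then lst.filter pvKeep1 else lst.filter pvKeep2

-- ===== PRECONDITION & SPEC =====
-- Pre_ excludes only the inputs on which A raises KeyError: part ≠ 1 together with some string
-- containing an adjacent equal pair of a non-digit character.
def Pre_findPairs (lst : List String) (part : Int) : Prop :=
  part = 1 ∨ ∀ s ∈ lst, ∀ p ∈ s.toList.zip s.toList.tail,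
    p.1 = p.2 → p.1 ∈ ['0','1','2','3','4','5','6','7','8','9']
instance (lst : List String) (part : Int) : Decidable (Pre_findPairs lst part) := by
  unfold Pre_findPairs; infer_instance

def pvWitness_findPairs : List String × Int := (["112233", "123444", "abcd"], 2)

def Spec_findPairs (lst : List String) (part : Int) (out : List String) : Prop := out = findPairs_alt lst part
instance (lst : List String) (part : Int) (out : List String) : Decidable (Spec_findPairs lst part out) := by unfold Spec_findPairs; infer_instance

-- ===== CLAIM (what is proved, stated in full; the proofs are below) =====
def Claim_equal_findPairs : Prop := ∀ (lst : List String) (part : Int), Dom_findPairs lst part → Pre_findPairs lst part → Spec_findPairs lst part (findPairs lst part)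

-- ===== LEMMAS AND PROOFS =====

-- removing each element of lst.filter p from lst (first occurrence each time) is filtering
theorem pvRemove_skip (ys : List String) (x : String) (l : List String) (h : ∀ y ∈ ys, y ≠ x) :
    pvRemoveAll (x :: l) ys = x :: pvRemoveAll l ys := by
  induction ys generalizing l with
  | nil => rfl
  | cons y ys ih =>
    have hyx : x ≠ y := (h y (by simp)).symm
    have step : (PySem.List.remove? (x :: l) y).getD (x :: l)
        = x :: (PySem.List.remove? l y).getD l := by
      rw [PySem.List.remove?_cons_of_ne l hyx]
      cases PySem.List.remove? l y <;> simp
    simp only [pvRemoveAll, List.foldl_cons] at *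
    rw [step, ih _ (fun y hy => h y (by simp [hy]))]

theorem pvRemoveAll_filter (p : String → Bool) (l : List String) :
    pvRemoveAll l (l.filter p) = l.filter (fun x => ! p x) := by
  induction l with
  | nil => rfl
  | cons x l ih =>
    by_cases hx : p x
    · simp only [List.filter_cons, hx, if_pos]
      simp only [pvRemoveAll, List.foldl_cons, PySem.List.remove?_cons_self, Option.getD_some]
      simpa [List.filter_cons, hx] using ih
    · simp only [List.filter_cons, hx]
      simp only [Bool.not_eq_true] at hx
      rw [if_neg (by simp [hx])]
      rw [pvRemove_skip _ _ _ (fun y hy => by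
        rintro rfl; exact absurd (List.of_mem_filter hy) (by simp [hx]))]
      simp [List.filter_cons, hx, ih]

-- the index loop over range(len(cs)-1) is a structural recursion on cs
def pvStructG {σ : Type} (g : σ → Char → Char → σ) : List Char → σ → σ
  | a :: b :: t, s => pvStructG g (b :: t) (g s a b)
  | _, s => s

theorem pvIdxLoop {σ : Type} (g : σ → Char → Char → σ) (cs : List Char) (s : σ) :
    (List.range (cs.length - 1)).foldl (fun s j => g s (cs.getD j ' ') (cs.getD (j+1) ' ')) s
      = pvStructG g cs s := by
  induction cs generalizing s with
  | nil => rfl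
  | cons a t ih =>
    cases t with
    | nil => rfl
    | cons b t' =>
      have hlen : (a :: b :: t').length - 1 = (b :: t').length - 1 + 1 := by simp
      rw [hlen, List.range_succ_eq_map, List.foldl_cons, List.foldl_map]
      simp only [List.getD_cons_succ, List.getD_cons_zero]
      exact ih (g s a b)

-- structural adjacent-pair counters
def pvAdjTotal : List Char → Int
  | a :: b :: t => (if a = b then 1 else 0) + pvAdjTotal (b :: t)
  | _ => 0

def pvHasAdj : List Char → Bool
  | a :: b :: t => (a = b) || pvHasAdj (b :: t)
  | _ => false

def pvCnt (c : Char) : List Char → Int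
  | a :: b :: t => (if a = b ∧ a = c then 1 else 0) + pvCnt c (b :: t)
  | _ => 0

theorem pvStructCount (cs : List Char) (acc : Int) :
    pvStructG (fun (p : Int) a b => if a = b then p + 1 else p) cs acc = acc + pvAdjTotal cs := by
  induction cs generalizing acc with
  | nil => simp [pvStructG, pvAdjTotal]
  | cons a t ih =>
    cases t with
    | nil => simp [pvStructG, pvAdjTotal]
    | cons b t' =>
      simp only [pvStructG, pvAdjTotal, ih]
      split_ifs <;> ring

theorem pvPairCountA_eq (cs : List Char) : pvPairCountA cs = pvAdjTotal cs := by
  have := pvIdxLoop (fun (p : Int) a b => if a = b then p + 1 else p) cs 0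
  simpa [pvPairCountA, pvStructCount] using this

theorem pvAdjTotal_nonneg (cs : List Char) : 0 ≤ pvAdjTotal cs := by
  induction cs with
  | nil => simp [pvAdjTotal]
  | cons a t ih =>
    cases t with
    | nil => simp [pvAdjTotal]
    | cons b t' => simp only [pvAdjTotal]; split_ifs <;> omega

theorem pvAdjTotal_zero_iff (cs : List Char) : pvAdjTotal cs = 0 ↔ pvHasAdj cs = false := by
  induction cs with
  | nil => simp [pvAdjTotal, pvHasAdj]
  | cons a t ih =>
    cases t with
    | nil => simp [pvAdjTotal, pvHasAdj]
    | cons b t' =>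
      have h := pvAdjTotal_nonneg (b :: t')
      simp only [pvAdjTotal, pvHasAdj] at *
      split_ifs with hab <;> simp [hab, ih] <;> omega

-- the foldl step of pvRuns, named
def pvStep2 (runs : List (Char × Int)) (ch : Char) : List (Char × Int) :=
  match runs.getLast? with
  | some (c, n) => if c = ch then runs.dropLast ++ [(c, n + 1)] else runs ++ [(ch, 1)]
  | none => [(ch, 1)]

-- the same step acting on the head of the reversed run list (the invariants live here)
def pvStep (runs : List (Char × Int)) (ch : Char) : List (Char × Int) :=
  match runs with
  | (c, n) :: rest => if c = ch then (c, n + 1) :: rest else (ch, 1) :: (c, n) :: rest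
  | [] => [(ch, 1)]

theorem pvStep2_reverse (r : List (Char × Int)) (ch : Char) :
    pvStep2 r ch = (pvStep r.reverse ch).reverse := by
  rcases List.eq_nil_or_concat r with rfl | ⟨l, ⟨c, n⟩, rfl⟩
  · rfl
  · rw [List.concat_eq_append]
    simp only [pvStep2, pvStep, List.getLast?_append_cons,
      List.reverse_append, List.reverse_cons, List.reverse_nil, List.nil_append, List.cons_append,
      List.dropLast_concat]
    split_ifs <;> simp_all

theorem pvRuns_rev (cs : List Char) : pvRuns cs = (cs.foldl pvStep []).reverse := by
  suffices h : ∀ (r : List (Char × Int)), cs.foldl pvStep2 r = (cs.foldl pvStep r.reverse).reverse by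
    simpa using h []
  induction cs with
  | nil => intro r; simp
  | cons ch cs' ih =>
    intro r
    simp only [List.foldl_cons]
    rw [ih (pvStep2 r ch), pvStep2_reverse, List.reverse_reverse]

theorem pvSumFor_acc (c : Char) (runs : List (Char × Int)) : ∀ (a : Int),
    runs.foldl (fun acc r => if r.1 = c then acc + (r.2 - 1) else acc) a
      = a + runs.foldl (fun acc r => if r.1 = c then acc + (r.2 - 1) else acc) 0 := by
  induction runs with
  | nil => simp
  | cons r rest ih =>
    intro a
    simp only [List.foldl_cons]
    rw [ih (if r.1 = c then a + (r.2 - 1) else a), ih (if r.1 = c then 0 + (r.2 - 1) else 0)]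
    split_ifs <;> ring

theorem pvSumFor_cons (c : Char) (d : Char) (n : Int) (rest : List (Char × Int)) :
    pvSumFor c ((d, n) :: rest) = (if d = c then n - 1 else 0) + pvSumFor c rest := by
  unfold pvSumFor
  rw [List.foldl_cons, pvSumFor_acc]
  split_ifs <;> ring

theorem pvSumFor_append (c : Char) (l1 l2 : List (Char × Int)) :
    pvSumFor c (l1 ++ l2) = pvSumFor c l1 + pvSumFor c l2 := by
  induction l1 with
  | nil => simp [pvSumFor]
  | cons r l ih =>
    rcases r with ⟨d, n⟩
    rw [List.cons_append, pvSumFor_cons, pvSumFor_cons, ih]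
    ring

theorem pvSumFor_reverse (c : Char) (l : List (Char × Int)) :
    pvSumFor c l.reverse = pvSumFor c l := by
  induction l with
  | nil => rfl
  | cons r l ih =>
    rcases r with ⟨d, n⟩
    rw [List.reverse_cons, pvSumFor_append, pvSumFor_cons, ih, pvSumFor_cons]
    simp [pvSumFor]
    ring

theorem pvSum_inv (d : Char) (cs : List Char) :
    ∀ (c : Char) (n : Int) (rest : List (Char × Int)),
    pvSumFor d (List.foldl pvStep ((c, n) :: rest) cs)
      = pvSumFor d ((c, n) :: rest) + pvCnt d (c :: cs) := by
  induction cs with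
  | nil => intro c n rest; simp [pvCnt]
  | cons ch cs' ih =>
    intro c n rest
    simp only [List.foldl_cons, pvStep]
    by_cases hc : c = ch
    · subst hc
      rw [if_pos rfl, ih c (n+1) rest]
      simp only [pvCnt, pvSumFor_cons]
      split_ifs <;> simp_all <;> ring
    · rw [if_neg hc, ih ch 1 ((c, n) :: rest)]
      simp only [pvCnt, pvSumFor_cons]
      have : ¬ (c = ch ∧ c = d) := by tauto
      rw [if_neg this]
      split_ifs <;> ring

theorem pvSumFor_runs (cs : List Char) (d : Char) : pvSumFor d (pvRuns cs) = pvCnt d cs := by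
  rw [pvRuns_rev, pvSumFor_reverse]
  cases cs with
  | nil => simp [pvSumFor, pvCnt]
  | cons a cs' =>
    simp only [List.foldl_cons, pvStep]
    rw [pvSum_inv d cs' a 1 []]
    simp [pvSumFor_cons, pvSumFor]

theorem pvAny_inv (cs : List Char) :
    ∀ (c : Char) (n : Int) (rest : List (Char × Int)), 1 ≤ n →
    (List.foldl pvStep ((c, n) :: rest) cs).any (fun r => 2 ≤ r.2)
      = (((c, n) :: rest).any (fun r => 2 ≤ r.2) || pvHasAdj (c :: cs)) := by
  induction cs with
  | nil => intro c n rest _; simp [pvHasAdj]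
  | cons ch cs' ih =>
    intro c n rest hn
    simp only [List.foldl_cons, pvStep]
    by_cases hc : c = ch
    · subst hc
      rw [if_pos rfl, ih c (n+1) rest (by omega)]
      simp only [pvHasAdj, List.any_cons]
      have h2 : decide (2 ≤ n + 1) = true := by simp; omega
      simp [h2]
    · rw [if_neg hc, ih ch 1 ((c, n) :: rest) (by omega)]
      simp only [pvHasAdj, List.any_cons]
      simp [hc]

theorem pvKeep1_eq (s : String) : pvKeep1 s = pvHasAdj s.toList := by
  unfold pvKeep1
  rw [pvRuns_rev, List.any_reverse]
  cases h : s.toList with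
  | nil => simp [pvHasAdj]
  | cons a cs' =>
    simp only [List.foldl_cons, pvStep]
    rw [pvAny_inv cs' a 1 [] (by omega)]
    simp

-- the dict step of A's part-2 loop
def pvDStep (d : PySem.Dict Char Int) (a b : Char) : PySem.Dict Char Int :=
  if a = b then d.modify a 0 (· + 1) else d

theorem pvDLoop_getD (cs : List Char) :
    ∀ (d : PySem.Dict Char Int) (c : Char),
    (pvStructG pvDStep cs d).getD c 0 = d.getD c 0 + pvCnt c cs := by
  induction cs with
  | nil => intro d c; simp [pvStructG, pvCnt]
  | cons a t ih =>
    intro d c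
    cases t with
    | nil => simp [pvStructG, pvCnt]
    | cons b t' =>
      simp only [pvStructG, pvCnt, ih, pvDStep]
      by_cases hab : a = b
      · rw [if_pos hab]
        rw [PySem.Dict.getD_modify]
        by_cases hac : c = a
        · subst hac; simp [hab]; ring
        · rw [if_neg hac]
          have : ¬ (a = b ∧ a = c) := by tauto
          simp [this]
      · have : ¬ (a = b ∧ a = c) := by tauto
        simp [hab, this]

theorem pvDLoop_keys (cs : List Char) :
    ∀ (d : PySem.Dict Char Int),
    (∀ p ∈ cs.zip cs.tail, p.1 = p.2 → p.1 ∈ d.keys) →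
    (pvStructG pvDStep cs d).keys = d.keys := by
  induction cs with
  | nil => intro d _; rfl
  | cons a t ih =>
    intro d h
    cases t with
    | nil => rfl
    | cons b t' =>
      simp only [pvStructG, pvDStep]
      by_cases hab : a = b
      · have ha : a ∈ d.keys := h (a, b) (by simp) hab
        have hk : (d.modify a 0 (· + 1)).keys = d.keys := by
          rw [PySem.Dict.keys_modify]
          exact PySem.Dict.keys_insert_of_contains d _
            (by rw [PySem.Dict.contains_eq_decide_mem_keys]; exact decide_eq_true ha)
        rw [if_pos hab, ih _ (by
          intro p hp he
          rw [hk]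
          exact h p (by simp [List.zip_cons_cons]; right; exact hp) he), hk]
      · rw [if_neg hab]
        exact ih _ (fun p hp he => h p (by simp [List.zip_cons_cons]; right; exact hp) he)

theorem pvPairDict_items (cs : List Char)
    (h : ∀ p ∈ cs.zip cs.tail, p.1 = p.2 → p.1 ∈ pvDigits) :
    (pvStructG pvDStep cs pvDict0).items = pvDigits.map (fun c => (c, pvCnt c cs)) := by
  have hkeys0 : pvDict0.keys = pvDigits := by decide
  have hkeys : (pvStructG pvDStep cs pvDict0).keys = pvDigits := by
    rw [pvDLoop_keys cs pvDict0 (by simpa [hkeys0] using h)]; exact hkeys0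
  have hnd : (pvStructG pvDStep cs pvDict0).keys.Nodup := by
    rw [hkeys]; decide
  rw [PySem.Dict.items_eq_map_keys _ hnd 0, hkeys]
  apply List.map_congr_left
  intro c hc
  rw [pvDLoop_getD]
  have h0 : pvDict0.getD c 0 = 0 := by
    fin_cases hc <;> decide
  simp [h0]

theorem pvPairDictA_eq (cs : List Char) : pvPairDictA cs = pvStructG pvDStep cs pvDict0 :=
  pvIdxLoop pvDStep cs pvDict0

theorem pvValuesA_eq (d : PySem.Dict Char Int) :
    pvValuesA d = if d.items.any (fun kv => kv.2 == 1) then 1 else 0 := by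
  unfold pvValuesA
  have : ∀ (items : List (Char × Int)) (v : Int),
      items.foldl (fun v kv => if kv.2 = 1 then 1 else v) v
        = if items.any (fun kv => kv.2 == 1) then 1 else v := by
    intro items
    induction items with
    | nil => intro v; simp
    | cons kv rest ih =>
      intro v
      simp only [List.foldl_cons, List.any_cons, ih]
      by_cases h1 : kv.2 = 1 <;> simp [h1]
  exact this d.items 0

-- per-string keep condition, part 2
theorem pvKeep2_iff (s : String)
    (h : ∀ p ∈ s.toList.zip s.toList.tail, p.1 = p.2 → p.1 ∈ pvDigits) :
    (pvValuesA (pvPairDictA s.toList) = 0) ↔ pvKeep2 s = false := by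
  rw [pvPairDictA_eq, pvValuesA_eq, pvPairDict_items s.toList h]
  unfold pvKeep2
  rw [List.any_map]
  have heq : ∀ c, pvSumFor c (pvRuns s.toList) = pvCnt c s.toList := fun c => pvSumFor_runs _ c
  simp only [heq]
  by_cases ha : (pvDigits.any fun c => pvCnt c s.toList == 1)
  · simp [ha]
    simpa using ha
  · simp only [Bool.not_eq_true] at ha
    simp [ha]
    simpa using ha

-- ===== VERDICT (by name: the statement is the Claim_ definition above) =====
theorem findPairs_spec : Claim_equal_findPairs := by
  intro lst part _ hpre
  unfold Spec_findPairs findPairs findPairs_alt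
  by_cases hp : part = 1
  · simp only [if_pos hp]
    rw [PySem.List.foldl_append_ite_eq_filter (fun i => pvPairCountA i.toList = 0) lst [],
      List.nil_append, pvRemoveAll_filter]
    apply List.filter_congr
    intro s _
    rw [pvKeep1_eq]
    have h := pvAdjTotal_zero_iff s.toList
    rw [pvPairCountA_eq]
    by_cases hz : pvAdjTotal s.toList = 0
    · simp [hz, h.mp hz]
    · have : pvHasAdj s.toList = true := by
        rcases Bool.eq_false_or_eq_true (pvHasAdj s.toList) with ht | hf
        · exact ht
        · exact absurd (h.mpr hf) hz
      simp [hz, this]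
  · simp only [if_neg hp]
    have hok : ∀ s ∈ lst, ∀ p ∈ s.toList.zip s.toList.tail, p.1 = p.2 → p.1 ∈ pvDigits := by
      rcases hpre with h1 | h2
      · exact absurd h1 hp
      · exact h2
    rw [PySem.List.foldl_append_ite_eq_filter (fun i => pvValuesA (pvPairDictA i.toList) = 0) lst [],
      List.nil_append, pvRemoveAll_filter]
    apply List.filter_congr
    intro s hs
    have h := pvKeep2_iff s (hok s hs)
    by_cases hz : pvValuesA (pvPairDictA s.toList) = 0
    · simp [hz, h.mp hz]
    · have : pvKeep2 s = true := by
        rcases Bool.eq_false_or_eq_true (pvKeep2 s) with ht | hf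
        · exact ht
        · exact absurd (h.mpr hf) hz
      simp [hz, this]
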